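-- pv_equiv track=rewrite | github.com/liuchzzyy/zotero-mcp-rss | src/zotero_mcp/clients/zotero/pdf_extractor.py | classify_by_type
-- ===== SOURCE A (Python) =====
-- from typing import Any
--
-- def classify_by_type(
--     elements: list[dict[str, Any]]
-- ) -> dict[str, list[dict[str, Any]]]:
--     """Classify elements by type.
--
--     Args:
--         elements: List of element dictionaries with 'type' field
--
--     Returns:
--         Dictionary with keys 'text', 'images', 'tables'
--     """
--     classified = {"text": [], "images": [], "tables": []}
--
--     # Map element types to classification keys
--     type_mapping = {
--         "text": "text",
--         "image": "images",
--         "table": "tables",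
--     }
--
--     for element in elements:
--         element_type = element.get("type", "text")
--         mapped_type = type_mapping.get(element_type, "text")
--         classified[mapped_type].append(element)
--
--     return classified
-- ===== SOURCE B (Python) =====
-- def classify_by_type(elements):
--     """Classify elements by type: three independent filter passes, one per bucket."""
--     return {
--         "text": [e for e in elements if e.get("type", "text") not in ("image", "table")],
--         "images": [e for e in elements if e.get("type", "text") == "image"],
--         "tables": [e for e in elements if e.get("type", "text") == "table"],
--     }
-- ===== Notes on version B (the rewrite author's own statement) =====
-- stated objective: idiomatic
-- what changed: Replaced the single dispatch loop that mutates a pre-built dict through a type->bucket mapping with three independent filter passes, each building its bucket directly from a predicate on the element's type.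
import Mathlib
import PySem

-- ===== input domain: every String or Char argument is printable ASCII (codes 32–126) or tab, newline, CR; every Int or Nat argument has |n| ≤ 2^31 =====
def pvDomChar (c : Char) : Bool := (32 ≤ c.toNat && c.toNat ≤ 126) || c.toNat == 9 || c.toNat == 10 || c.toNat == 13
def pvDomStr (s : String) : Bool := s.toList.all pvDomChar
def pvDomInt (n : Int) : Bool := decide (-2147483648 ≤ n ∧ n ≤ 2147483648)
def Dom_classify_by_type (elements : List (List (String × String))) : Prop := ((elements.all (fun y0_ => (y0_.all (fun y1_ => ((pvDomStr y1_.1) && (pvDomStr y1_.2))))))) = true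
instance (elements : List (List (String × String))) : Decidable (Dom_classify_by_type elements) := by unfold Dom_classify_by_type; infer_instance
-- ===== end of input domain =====

-- B replaces A's single dispatch loop over a mutated dict with three independent filter passes (idiomatic decomposition; same output).

-- ===== PORT A =====
def classify_by_type (elements : List (List (String × String))) : List (String × List (List (String × String))) :=
  let classified : PySem.Dict String (List (List (String × String))) :=
    PySem.Dict.mk [("text", []), ("images", []), ("tables", [])]
  let type_mapping : PySem.Dict String String :=
    PySem.Dict.mk [("text", "text"), ("image", "images"), ("table", "tables")]
  -- classified[mapped_type].append(element): mapped_type is always a key, so modify with default [] is exact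
  (elements.foldl (fun cl element =>
      let element_type := (PySem.Dict.mk element).getD "type" "text"
      let mapped_type := type_mapping.getD element_type "text"
      cl.modify mapped_type [] (fun l => l ++ [element])) classified).items

-- ===== PORT B =====
def classify_by_type_alt (elements : List (List (String × String))) : List (String × List (List (String × String))) :=
  [("text", elements.filter (fun e =>
      let t := (PySem.Dict.mk e).getD "type" "text"
      !(t == "image" || t == "table"))),
   ("images", elements.filter (fun e => (PySem.Dict.mk e).getD "type" "text" == "image")),
   ("tables", elements.filter (fun e => (PySem.Dict.mk e).getD "type" "text" == "table"))]

-- ===== PRECONDITION & SPEC =====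
def Spec_classify_by_type (elements : List (List (String × String))) (out : List (String × List (List (String × String)))) : Prop := out = classify_by_type_alt elements
instance (elements : List (List (String × String))) (out : List (String × List (List (String × String)))) : Decidable (Spec_classify_by_type elements out) := by unfold Spec_classify_by_type; infer_instance

-- ===== CLAIM (what is proved, stated in full; the proofs are below) =====
def Claim_equal_classify_by_type : Prop := ∀ (elements : List (List (String × String))), Dom_classify_by_type elements → Spec_classify_by_type elements (classify_by_type elements)

-- ===== LEMMAS AND PROOFS =====

-- One iteration of A's loop on the three-bucket dict appends e to the bucket named by its type.
theorem step_eval (e : List (String × String)) (t i b : List (List (String × String))) :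
    (PySem.Dict.mk [("text", t), ("images", i), ("tables", b)]).modify
        ((PySem.Dict.mk [("text", "text"), ("image", "images"), ("table", "tables")]).getD
          ((PySem.Dict.mk e).getD "type" "text") "text") [] (fun l => l ++ [e]) =
    (if (PySem.Dict.mk e).getD "type" "text" = "image" then
      PySem.Dict.mk [("text", t), ("images", i ++ [e]), ("tables", b)]
    else if (PySem.Dict.mk e).getD "type" "text" = "table" then
      PySem.Dict.mk [("text", t), ("images", i), ("tables", b ++ [e])]
    else
      PySem.Dict.mk [("text", t ++ [e]), ("images", i), ("tables", b)]) := by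
  have aux : ∀ et : String, et ≠ "image" → et ≠ "table" → et ≠ "text" →
      (PySem.Dict.mk [("text", "text"), ("image", "images"), ("table", "tables")]).getD et "text" = "text" := by
    intro et a b c
    simp [PySem.Dict.getD, PySem.Dict.get?, Ne.symm a, Ne.symm b, Ne.symm c]
  by_cases h1 : (PySem.Dict.mk e).getD "type" "text" = "image"
  · rw [h1]
    simp [PySem.Dict.getD, PySem.Dict.get?, PySem.Dict.modify, PySem.Dict.insert, PySem.Dict.contains]
  · by_cases h2 : (PySem.Dict.mk e).getD "type" "text" = "table"
    · rw [h2]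
      simp [PySem.Dict.getD, PySem.Dict.get?, PySem.Dict.modify, PySem.Dict.insert, PySem.Dict.contains]
    · rw [if_neg h1, if_neg h2]
      by_cases h3 : (PySem.Dict.mk e).getD "type" "text" = "text"
      · rw [h3]
        simp [PySem.Dict.getD, PySem.Dict.get?, PySem.Dict.modify, PySem.Dict.insert, PySem.Dict.contains]
      · rw [aux _ h1 h2 h3]
        simp [PySem.Dict.getD, PySem.Dict.get?, PySem.Dict.modify, PySem.Dict.insert, PySem.Dict.contains]

-- A's loop, run from any three bucket contents, appends exactly B's three filters.
theorem classify_loop (es : List (List (String × String)))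
    (t i b : List (List (String × String))) :
    (es.foldl (fun cl element =>
        let element_type := (PySem.Dict.mk element).getD "type" "text"
        let mapped_type := (PySem.Dict.mk [("text", "text"), ("image", "images"), ("table", "tables")]).getD element_type "text"
        cl.modify mapped_type [] (fun l => l ++ [element]))
      (PySem.Dict.mk [("text", t), ("images", i), ("tables", b)])) =
    PySem.Dict.mk
      [("text", t ++ es.filter (fun e =>
          let ty := (PySem.Dict.mk e).getD "type" "text"
          !(ty == "image" || ty == "table"))),
       ("images", i ++ es.filter (fun e => (PySem.Dict.mk e).getD "type" "text" == "image")),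
       ("tables", b ++ es.filter (fun e => (PySem.Dict.mk e).getD "type" "text" == "table"))] := by
  induction es generalizing t i b with
  | nil => simp
  | cons e es ih =>
    simp only [List.foldl_cons, List.filter_cons]
    rw [step_eval]
    by_cases h1 : (PySem.Dict.mk e).getD "type" "text" = "image"
    · simp [h1, ih]
    · by_cases h2 : (PySem.Dict.mk e).getD "type" "text" = "table"
      · simp [h2, ih]
      · simp [h1, h2, ih]

-- ===== VERDICT (by name: the statement is the Claim_ definition above) =====
theorem classify_by_type_spec : Claim_equal_classify_by_type := by
  intro elements _
  simp only [Spec_classify_by_type, classify_by_type, classify_by_type_alt]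
  rw [classify_loop]
  simp
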